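-- pv_equiv track=rewrite | github.com/kislay-yadav/Ytdown | bot-1.py | _get_available_qualities
-- ===== SOURCE A (Python) =====
-- from typing import Dict, List, Optional, Tuple, Callable
--
-- def _get_available_qualities(formats: List[Dict]) -> List[str]:
--     available = set()
--     quality_heights = {
--         144: "144p", 240: "240p", 360: "360p", 480: "480p",
--         720: "720p", 1080: "1080p", 1440: "1440p", 2160: "2160p"
--     }
--
--     for fmt in formats:
--         height = fmt.get('height')
--         if height:
--             for h, q in quality_heights.items():
--                 if height >= h:
--                     available.add(q)
--
--     quality_order = ["144p", "240p", "360p", "480p", "720p", "1080p", "1440p", "2160p"]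
--     return [q for q in quality_order if q in available]
-- ===== SOURCE B (Python) =====
-- def _get_available_qualities(formats):
--     # Pass 1: extract heights; pass 2: max of truthy heights; then the
--     # available labels are exactly a prefix of the order list (thresholds
--     # are increasing), found with a while loop and returned by slicing.
--     heights = [f.get('height') for f in formats]
--     m = 0
--     for h in heights:
--         if h:
--             m = max(m, h)
--     thresholds = [144, 240, 360, 480, 720, 1080, 1440, 2160]
--     labels = ["144p", "240p", "360p", "480p", "720p", "1080p", "1440p", "2160p"]
--     n = 0
--     while n < len(thresholds) and thresholds[n] <= m:
--         n += 1
--     return labels[:n]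
-- ===== Notes on version B (the rewrite author's own statement) =====
-- stated objective: simpler
-- what changed: Replaces A's nested loop unioning labels into a set with staged passes: extract heights, take the max of truthy heights, then return the prefix of the label list whose thresholds the max reaches (correct because thresholds are increasing, so available labels form a prefix).
import Mathlib
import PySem

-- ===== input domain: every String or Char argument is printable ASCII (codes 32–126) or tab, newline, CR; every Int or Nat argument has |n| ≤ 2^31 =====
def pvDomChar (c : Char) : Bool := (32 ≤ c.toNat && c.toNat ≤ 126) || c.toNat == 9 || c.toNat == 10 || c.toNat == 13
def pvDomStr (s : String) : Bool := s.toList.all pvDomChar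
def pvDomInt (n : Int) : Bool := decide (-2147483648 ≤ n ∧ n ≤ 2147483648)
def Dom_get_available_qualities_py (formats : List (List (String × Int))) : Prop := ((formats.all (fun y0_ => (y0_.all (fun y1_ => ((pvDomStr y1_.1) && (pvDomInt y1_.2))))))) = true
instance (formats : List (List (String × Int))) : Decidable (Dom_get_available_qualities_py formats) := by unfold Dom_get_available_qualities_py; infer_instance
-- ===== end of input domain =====

-- B replaces A's nested per-format set-union loop by staged passes: extract heights, max of truthy heights, then a prefix of the label list (simpler, same result).

-- ===== PORT A =====
-- quality_heights dict, iterated via .items(): ported as its insertion-ordered pair list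
def pvQualityHeights : List (Int × String) :=
  [(144, "144p"), (240, "240p"), (360, "360p"), (480, "480p"),
   (720, "720p"), (1080, "1080p"), (1440, "1440p"), (2160, "2160p")]

def pvQualityOrder : List String :=
  ["144p", "240p", "360p", "480p", "720p", "1080p", "1440p", "2160p"]

def get_available_qualities_py (formats : List (List (String × Int))) : List String :=
  let available : PySem.Set String :=
    formats.foldl (fun avail fmt =>
      match (PySem.Dict.mk fmt).get? "height" with
      | none => avail
      | some h =>
        if h ≠ 0 then
          pvQualityHeights.foldl (fun av p => if h ≥ p.1 then PySem.Set.add av p.2 else av) avail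
        else avail) PySem.Set.empty
  pvQualityOrder.filter (fun q => PySem.Set.contains available q)

-- ===== PORT B =====
def pvThresholdsB : List Int := [144, 240, 360, 480, 720, 1080, 1440, 2160]

def pvLabelsB : List String :=
  ["144p", "240p", "360p", "480p", "720p", "1080p", "1440p", "2160p"]

-- the while loop 'n = 0; while n < len(thresholds) and thresholds[n] <= m: n += 1'
def pvPrefixLen (m : Int) : List Int → Nat
  | [] => 0
  | t :: ts => if t ≤ m then pvPrefixLen m ts + 1 else 0

def get_available_qualities_py_alt (formats : List (List (String × Int))) : List String :=
  let heights : List (Option Int) := formats.map (fun f => (PySem.Dict.mk f).get? "height")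
  let m : Int := heights.foldl (fun m h =>
    match h with
    | none => m
    | some h => if h ≠ 0 then max m h else m) 0
  pvLabelsB.take (pvPrefixLen m pvThresholdsB)    -- labels[:n], n ≥ 0: exact

-- ===== PRECONDITION & SPEC =====
def Spec_get_available_qualities_py (formats : List (List (String × Int))) (out : List String) : Prop := out = get_available_qualities_py_alt formats
instance (formats : List (List (String × Int))) (out : List String) : Decidable (Spec_get_available_qualities_py formats out) := by unfold Spec_get_available_qualities_py; infer_instance

-- ===== CLAIM (what is proved, stated in full; the proofs are below) =====
def Claim_equal_get_available_qualities_py : Prop := ∀ (formats : List (List (String × Int))), Dom_get_available_qualities_py formats → Spec_get_available_qualities_py formats (get_available_qualities_py formats)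

-- ===== LEMMAS AND PROOFS =====

-- membership in A's inner fold over the table
lemma mem_inner_fold (l : List (Int × String)) (s : PySem.Set String) (h : Int) (y : String) :
    y ∈ l.foldl (fun av p => if h ≥ p.1 then PySem.Set.add av p.2 else av) s ↔
      y ∈ s ∨ ∃ p ∈ l, h ≥ p.1 ∧ y = p.2 := by
  induction l generalizing s with
  | nil => simp
  | cons p l ih =>
    simp only [List.foldl_cons]
    by_cases hp : h ≥ p.1
    · rw [if_pos hp, ih]
      simp [PySem.Set.mem_add, hp]
      tauto
    · rw [if_neg hp, ih]
      simp [hp]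

-- for a table entry, some entry of the table is reached by h iff this entry's threshold is
lemma exists_table (p : Int × String) (hp : p ∈ pvQualityHeights) (h : Int) :
    (∃ p' ∈ pvQualityHeights, h ≥ p'.1 ∧ p.2 = p'.2) ↔ h ≥ p.1 := by
  fin_cases hp <;> simp [pvQualityHeights]

-- loop invariant: A's set and B's running max stay related
lemma fold_invariant (formats : List (List (String × Int))) (s : PySem.Set String) (m : Int)
    (hinv : ∀ p ∈ pvQualityHeights, (p.2 ∈ s ↔ p.1 ≤ m)) :
    ∀ p ∈ pvQualityHeights,
      (p.2 ∈ formats.foldl (fun avail fmt =>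
          match (PySem.Dict.mk fmt).get? "height" with
          | none => avail
          | some h =>
            if h ≠ 0 then
              pvQualityHeights.foldl (fun av p => if h ≥ p.1 then PySem.Set.add av p.2 else av) avail
            else avail) s ↔
        p.1 ≤ (formats.map (fun f => (PySem.Dict.mk f).get? "height")).foldl (fun m h =>
          match h with
          | none => m
          | some h => if h ≠ 0 then max m h else m) m) := by
  induction formats generalizing s m with
  | nil => exact hinv
  | cons fmt rest ih =>
    simp only [List.map_cons, List.foldl_cons]
    cases hg : (PySem.Dict.mk fmt).get? "height" with
    | none => exact ih s m hinv
    | some h =>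
      dsimp only
      by_cases hz : h ≠ 0
      · rw [if_pos hz, if_pos hz]
        refine ih _ (max m h) ?_
        intro p hp
        rw [mem_inner_fold, hinv p hp, exists_table p hp h]
        omega
      · rw [if_neg hz, if_neg hz]
        exact ih s m hinv

-- filtering the order list against the set equals taking the prefix, given the membership characterisation
lemma filter_eq_take (l : List (Int × String)) (s : PySem.Set String) (m : Int)
    (hsort : l.Pairwise (fun a b => a.1 ≤ b.1))
    (H : ∀ p ∈ l, (p.2 ∈ s ↔ p.1 ≤ m)) :
    (l.map Prod.snd).filter (fun q => PySem.Set.contains s q) =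
      (l.map Prod.snd).take (pvPrefixLen m (l.map Prod.fst)) := by
  induction l with
  | nil => rfl
  | cons p l ih =>
    obtain ⟨hhead, htail⟩ := List.pairwise_cons.mp hsort
    have Hp := H p (List.mem_cons_self)
    simp only [List.map_cons, List.filter_cons, pvPrefixLen]
    by_cases hle : p.1 ≤ m
    · have : PySem.Set.contains s p.2 = true := by
        simpa [PySem.Set.contains] using Hp.mpr hle
      rw [this, if_pos hle]
      simp only [List.take_succ_cons]
      rw [ih htail (fun q hq => H q (List.mem_cons_of_mem _ hq))]
      simp
    · have : PySem.Set.contains s p.2 = false := by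
        simp only [PySem.Set.contains]
        simpa using fun hm => hle (Hp.mp hm)
      simp only [this, Bool.false_eq_true, if_false, if_neg hle, List.take_zero]
      -- none of the remaining labels is in the set (their thresholds are even larger)
      apply List.filter_eq_nil_iff.mpr
      intro q hq
      obtain ⟨p', hp', rfl⟩ := List.mem_map.mp hq
      have := H p' (List.mem_cons_of_mem _ hp')
      have h2 : ¬ p'.1 ≤ m := fun hc => hle (le_trans (hhead p' hp') hc)
      simpa using fun hm => h2 (this.mp hm)

-- ===== VERDICT (by name: the statement is the Claim_ definition above) =====
theorem get_available_qualities_py_spec : Claim_equal_get_available_qualities_py := by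
  intro formats _
  unfold Spec_get_available_qualities_py get_available_qualities_py get_available_qualities_py_alt
  have hinv := fold_invariant formats PySem.Set.empty 0
    (by intro p hp; fin_cases hp <;> simp [PySem.Set.empty])
  rw [show pvQualityOrder = pvQualityHeights.map Prod.snd from rfl,
      show pvLabelsB = pvQualityHeights.map Prod.snd from rfl,
      show pvThresholdsB = pvQualityHeights.map Prod.fst from rfl]
  exact filter_eq_take pvQualityHeights _ _ (by decide) hinv
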